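-- pv_equiv track=rewrite | github.com/grapheneaffiliate/h4-polytopic-attention | solve_batch20.py | solve_d037b0a7
-- ===== SOURCE A (Python) =====
-- import copy
--
-- def solve_d037b0a7(grid):
--     h, w = len(grid), len(grid[0])
--     out = copy.deepcopy(grid)
--     for c in range(w):
--         val = 0
--         for r in range(h):
--             if grid[r][c] != 0:
--                 val = grid[r][c]
--             if val != 0:
--                 out[r][c] = val
--     return out
-- ===== SOURCE B (Python) =====
-- def solve_d037b0a7(grid):
--     h, w = len(grid), len(grid[0])
--
--     def nearest_above(r, c):
--         for rr in range(r, -1, -1):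
--             if grid[rr][c] != 0:
--                 return grid[rr][c]
--         return grid[r][c]
--
--     out = [list(row) for row in grid]
--     for r in range(h):
--         for c in range(w):
--             out[r][c] = nearest_above(r, c)
--     return out
-- ===== Notes on version B (the rewrite author's own statement) =====
-- stated objective: alternative
-- what changed: Replaces A's stateful column scan (a downward-carried 'val' written as it goes) by a stateless per-cell rule: each output cell is computed independently as the nearest nonzero value at or above it, found by scanning upward from the cell.
import Mathlib
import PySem

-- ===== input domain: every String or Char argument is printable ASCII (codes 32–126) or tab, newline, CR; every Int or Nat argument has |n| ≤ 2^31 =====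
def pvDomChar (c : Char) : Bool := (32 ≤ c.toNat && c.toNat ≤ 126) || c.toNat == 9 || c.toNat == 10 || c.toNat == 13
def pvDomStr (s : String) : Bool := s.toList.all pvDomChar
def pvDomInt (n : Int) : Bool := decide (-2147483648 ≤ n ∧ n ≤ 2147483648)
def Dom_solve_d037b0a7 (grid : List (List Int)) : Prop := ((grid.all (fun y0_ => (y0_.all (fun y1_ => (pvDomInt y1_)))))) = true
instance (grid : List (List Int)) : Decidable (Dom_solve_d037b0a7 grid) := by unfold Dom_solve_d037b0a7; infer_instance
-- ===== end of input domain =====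

-- B replaces A's stateful downward carry scan by a stateless per-cell rule: every output
-- cell is the nearest nonzero value at or above it, found by scanning upward (alternative
-- decomposition, no carried state; same return value on Pre_).

-- ===== PORT A =====
-- literal transliteration of A: h,w; out = deepcopy(grid); for c in range(w): val = 0;
-- for r in range(h): read grid[r][c], update val, write out[r][c] when val != 0.
def solve_d037b0a7 (grid : List (List Int)) : List (List Int) :=
  let h : Int := (grid.length : Int)
  let w : Int := (((PySem.List.pyGet? grid 0).getD []).length : Int)
  (PySem.List.pyRange 0 w 1).foldl (fun out c =>
    ((PySem.List.pyRange 0 h 1).foldl (fun (st : List (List Int) × Int) r =>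
      let g := PySem.List.pyGetD (PySem.List.pyGetD grid r []) c 0
      let val := if g ≠ 0 then g else st.2
      let out' := if val ≠ 0 then
          PySem.List.pySetD st.1 r (PySem.List.pySetD (PySem.List.pyGetD st.1 r []) c val)
        else st.1
      (out', val)) (out, 0)).1) grid

-- ===== PORT B =====
-- literal transliteration of B's helper nearest_above(r, c): the early-return loop
-- 'for rr in range(r, -1, -1): if grid[rr][c] != 0: return grid[rr][c]' is the first
-- hit of a search over that range (findSome?), with the final 'return grid[r][c]' as default.
def nearestAbove (grid : List (List Int)) (r c : Int) : Int :=
  ((PySem.List.pyRange r (-1) (-1)).findSome? (fun rr =>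
      let x := PySem.List.pyGetD (PySem.List.pyGetD grid rr []) c 0
      if x ≠ 0 then some x else none)).getD
    (PySem.List.pyGetD (PySem.List.pyGetD grid r []) c 0)

-- literal transliteration of B: h, w; out = [list(row) for row in grid];
-- for r in range(h): for c in range(w): out[r][c] = nearest_above(r, c).
def solve_d037b0a7_alt (grid : List (List Int)) : List (List Int) :=
  let h : Int := (grid.length : Int)
  let w : Int := (((PySem.List.pyGet? grid 0).getD []).length : Int)
  let out := grid.map (fun row => row)
  (PySem.List.pyRange 0 h 1).foldl (fun out r =>
    (PySem.List.pyRange 0 w 1).foldl (fun out c =>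
      PySem.List.pySetD out r
        (PySem.List.pySetD (PySem.List.pyGetD out r []) c (nearestAbove grid r c))) out) out

-- ===== PRECONDITION & SPEC =====
-- Pre_ excludes exactly the inputs on which A raises IndexError: the empty grid
-- (grid[0]) and grids with a row shorter than the first row (grid[r][c] / out[r][c]).
def Pre_solve_d037b0a7 (grid : List (List Int)) : Prop :=
  grid ≠ [] ∧ ∀ row ∈ grid, (grid.headD []).length ≤ row.length
instance (grid : List (List Int)) : Decidable (Pre_solve_d037b0a7 grid) := by
  unfold Pre_solve_d037b0a7; infer_instance
def pvWitness_solve_d037b0a7 : List (List Int) := [[1, 0], [0, 2], [0, 0]]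

def Spec_solve_d037b0a7 (grid : List (List Int)) (out : List (List Int)) : Prop := out = solve_d037b0a7_alt grid
instance (grid : List (List Int)) (out : List (List Int)) : Decidable (Spec_solve_d037b0a7 grid out) := by unfold Spec_solve_d037b0a7; infer_instance

-- ===== CLAIM (what is proved, stated in full; the proofs are below) =====
def Claim_equal_solve_d037b0a7 : Prop := ∀ (grid : List (List Int)), Dom_solve_d037b0a7 grid → Pre_solve_d037b0a7 grid → Spec_solve_d037b0a7 grid (solve_d037b0a7 grid)

-- ===== LEMMAS AND PROOFS =====

-- Row-streaming recursion with a carried per-column vector `last` (proof-internal bridge).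
def fillRows (w : Nat) (last : List Int) : List (List Int) → List (List Int)
  | [] => []
  | row :: rest =>
      let last' := (row.zip last).map (fun p => if p.1 ≠ 0 then p.1 else p.2)
      ((row.zip last').map (fun p => if p.2 ≠ 0 then p.2 else p.1) ++ row.drop w)
        :: fillRows w last' rest

-- A's inner (per-column) loop as structural recursion over the rows.
def innerSpec (c : Nat) (v : Int) : List (List Int) → List (List Int) → List (List Int)
  | [], os => os
  | _ :: _, [] => []
  | g :: gs, o :: os =>
      let x := g.getD c 0
      let v' := if x ≠ 0 then x else v
      (if v' ≠ 0 then o.set c v' else o) :: innerSpec c v' gs os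

-- the downward carry step and the carry over a column prefix
def carrystep (a x : Int) : Int := if x ≠ 0 then x else a

def colCarry (p : List (List Int)) (c : Nat) : Int :=
  (p.map (fun g => g.getD c 0)).foldl carrystep 0

-- the value B computes for cell (r, c), expressed through the carry
def cellG (grid : List (List Int)) (r c : Nat) : Int :=
  let cr := colCarry (grid.take (r + 1)) c
  if cr ≠ 0 then cr else (grid.getD r []).getD c 0

-- the common normal form of both ports: row r of the output, built per cell
def buildOut (grid : List (List Int)) (W : Nat) : Nat → List (List Int) → List (List Int)
  | _, [] => []
  | r, row :: rest =>
      ((List.range W).map (fun c => cellG grid r c) ++ row.drop W) :: buildOut grid W (r + 1) rest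

theorem fillRows_length (w : Nat) : ∀ (last : List Int) (gs : List (List Int)),
    (fillRows w last gs).length = gs.length := by
  intro last gs
  induction gs generalizing last with
  | nil => rfl
  | cons row rest ih => simp [fillRows, ih]

-- helper: set at the length of a prefix
theorem set_append_length {α : Type} (xs : List α) : ∀ (ys : List α) (a : α),
    (xs ++ ys).set xs.length a = xs ++ ys.set 0 a := by
  induction xs with
  | nil => intro ys a; simp
  | cons x xs ih => intro ys a; simp [ih]

-- helper: getD at the length of a prefix
theorem getD_append_length {α : Type} (xs : List α) (y : α) (ys : List α) (d : α) :
    (xs ++ y :: ys).getD xs.length d = y := by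
  simp [List.getD]

-- A's inner fold over row indices equals innerSpec (indices shifted by the processed prefix).
theorem inner_eq (c : Nat) (G : List (List Int)) :
    ∀ (gs gdone done os : List (List Int)) (v : Int),
    G = gdone ++ gs → done.length = gdone.length → os.length = gs.length →
    ((PySem.List.pyRange (gdone.length : Int) ((gdone.length : Int) + (gs.length : Int)) 1).foldl
      (fun (st : List (List Int) × Int) r =>
        let g := PySem.List.pyGetD (PySem.List.pyGetD G r []) (c : Int) 0
        let val := if g ≠ 0 then g else st.2
        let out' := if val ≠ 0 then
            PySem.List.pySetD st.1 r (PySem.List.pySetD (PySem.List.pyGetD st.1 r []) (c : Int) val)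
          else st.1
        (out', val)) (done ++ os, v)).1
      = done ++ innerSpec c v gs os := by
  intro gs
  induction gs with
  | nil =>
      intro gdone done os v hG hd hos
      rw [List.length_eq_zero_iff.mp hos]
      rw [PySem.List.pyRange_one_eq_nil (by simp)]
      simp [innerSpec]
  | cons g gs' ih =>
      intro gdone done os v hG hd hos
      cases os with
      | nil => simp at hos
      | cons o os' =>
        simp only [List.length_cons] at hos
        have hos' : os'.length = gs'.length := by omega
        rw [PySem.List.pyRange_one_cons (by simp only [List.length_cons]; push_cast; omega), List.foldl_cons]
        have hread : PySem.List.pyGetD G (gdone.length : Int) [] = g := by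
          rw [hG, PySem.List.pyGetD_natCast, getD_append_length]
        have hstate : PySem.List.pyGetD (done ++ o :: os') (gdone.length : Int) [] = o := by
          rw [PySem.List.pyGetD_natCast, ← hd, getD_append_length]
        simp only [hread, hstate, PySem.List.pySetD_natCast]
        rw [PySem.List.pyGetD_natCast g]
        set v' := if (g.getD c 0 ≠ 0) then g.getD c 0 else v with hv'
        set o' := if v' ≠ 0 then o.set c v' else o with ho'
        have hset : ((done ++ o :: os').set gdone.length (o.set c v') : List (List Int))
            = done ++ (o.set c v') :: os' := by
          rw [← hd, set_append_length]; simp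
        have hst : ((if v' ≠ 0 then (done ++ o :: os').set gdone.length (o.set c v')
              else done ++ o :: os'), v')
            = (((done ++ [o']) ++ os' : List (List Int)), v') := by
          rw [ho']; split <;> simp [hset]
        rw [hst]
        have hb1 : ((gdone.length : Int) + 1) = (((gdone ++ [g]).length : Nat) : Int) := by
          simp
        have hb2 : ((gdone.length : Int) + ((g :: gs').length : Int))
            = (((gdone ++ [g]).length : Nat) : Int) + (gs'.length : Int) := by
          simp; ring
        simp only [PySem.List.pySetD_natCast] at ih
        rw [hb1, hb2, ih (gdone ++ [g]) (done ++ [o']) os' v' (by simp [hG]) (by simp [hd]) hos']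
        simp [innerSpec, ho', hv']

-- zip truncates at the length of its second argument
theorem zip_trunc {α β : Type} : ∀ (xs : List α) (ys : List β),
    xs.zip ys = (xs.take ys.length).zip ys := by
  intro xs
  induction xs with
  | nil => intro ys; simp
  | cons x xs ih =>
      intro ys
      cases ys with
      | nil => simp
      | cons y ys => simp [List.zip_cons_cons, ih ys]

-- splitting a zip against `last ++ [v]` at position last.length < row.length
theorem zip_snoc (row last : List Int) (v : Int) (h : last.length < row.length) :
    row.zip (last ++ [v])
      = (row.take last.length).zip last ++ [(row[last.length]'h, v)] := by
  conv_lhs => rw [← List.take_append_drop last.length row]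
  rw [List.zip_append (by simp; omega)]
  rw [List.drop_eq_getElem_cons h, List.zip_cons_cons]
  simp

-- one column step on top of the first k filled columns extends the fill to k+1 columns
theorem step_col (k : Nat) :
    ∀ (gs : List (List Int)) (last : List Int) (v : Int),
    last.length = k → (∀ row ∈ gs, k < row.length) →
    innerSpec k v gs (fillRows k last gs) = fillRows (k + 1) (last ++ [v]) gs := by
  intro gs
  induction gs with
  | nil => intro last v _ _; simp [fillRows, innerSpec]
  | cons row rest ih =>
      intro last v hlen hrows
      subst hlen
      have hk : last.length < row.length := hrows row (by simp)
      simp only [fillRows, innerSpec]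
      set last' := (row.zip last).map (fun p => if p.1 ≠ 0 then p.1 else p.2) with hlast'
      have hlen' : last'.length = last.length := by
        simp [hlast', List.length_zip]; omega
      set x := row.getD last.length 0 with hx
      have hxe : x = row[last.length]'hk := by
        simp [hx, List.getD_eq_getElem?_getD, List.getElem?_eq_getElem hk]
      set v' := if x ≠ 0 then x else v with hv'
      -- the new `last` vector is last' ++ [v']
      have hL : (row.zip (last ++ [v])).map (fun p => if p.1 ≠ 0 then p.1 else p.2)
          = last' ++ [v'] := by
        rw [zip_snoc row last v hk]
        simp only [List.map_append, List.map_cons, List.map_nil]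
        congr 1
        · rw [hlast', zip_trunc row last]
        · simp [hv', hxe]
      rw [hL]
      -- heads agree
      have hZlen : ((row.zip last').map
          (fun p => if p.2 ≠ 0 then p.2 else p.1)).length = last.length := by
        simp [List.length_zip, hlen']; omega
      have hhead : (if v' ≠ 0 then
            ((row.zip last').map (fun p => if p.2 ≠ 0 then p.2 else p.1)
              ++ row.drop last.length).set last.length v'
          else (row.zip last').map (fun p => if p.2 ≠ 0 then p.2 else p.1)
              ++ row.drop last.length)
          = (row.zip (last' ++ [v'])).map (fun p => if p.2 ≠ 0 then p.2 else p.1)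
            ++ row.drop (last.length + 1) := by
        rw [zip_snoc row last' v' (by omega), ← zip_trunc row last']
        simp only [List.map_append, List.map_cons, List.map_nil, hlen']
        by_cases h0 : v' = 0
        · have hx0 : x = 0 := by
            by_contra hxne
            simp [hv', hxne] at h0
          rw [List.drop_eq_getElem_cons hk]
          simp [h0, ← hxe, hx0]
        · rw [if_pos h0, if_pos h0, ← hZlen, set_append_length,
            List.drop_eq_getElem_cons (by omega : (List.map (fun p => if p.2 ≠ 0 then p.2 else p.1) (row.zip last')).length < row.length)]
          simp
          rw [List.drop_eq_getElem_cons (show min row.length last'.length < row.length by omega),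
            List.set_cons_zero]
      rw [hhead, ih last' v' hlen' (fun r hr => hrows r (by simp [hr]))]

theorem fillRows_zero : ∀ (gs : List (List Int)), fillRows 0 [] gs = gs := by
  intro gs
  induction gs with
  | nil => rfl
  | cons r t ih => simp [fillRows, ih]

-- A's outer loop over the first k columns produces the first k columns of the fill
theorem outer_fold (W : Nat) (grid : List (List Int)) (hrows : ∀ row ∈ grid, W ≤ row.length) :
    ∀ k, k ≤ W →
    ((PySem.List.pyRange 0 (k : Int) 1).foldl (fun out c =>
      ((PySem.List.pyRange 0 (grid.length : Int) 1).foldl (fun (st : List (List Int) × Int) r =>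
        let g := PySem.List.pyGetD (PySem.List.pyGetD grid r []) c 0
        let val := if g ≠ 0 then g else st.2
        let out' := if val ≠ 0 then
            PySem.List.pySetD st.1 r (PySem.List.pySetD (PySem.List.pyGetD st.1 r []) c val)
          else st.1
        (out', val)) (out, 0)).1) grid)
      = fillRows k (List.replicate k 0) grid := by
  intro k
  induction k with
  | zero =>
      intro _
      rw [show ((0 : Nat) : Int) = 0 from rfl, PySem.List.pyRange_one_eq_nil le_rfl]
      simp only [List.foldl_nil, List.replicate_zero]
      exact (fillRows_zero grid).symm
  | succ k ih =>
      intro hk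
      have h1 : ((k + 1 : Nat) : Int) = (k : Int) + 1 := by push_cast; ring
      rw [h1, PySem.List.pyRange_one_succ_right (by positivity), List.foldl_append,
        ih (by omega)]
      simp only [List.foldl_cons, List.foldl_nil]
      have hlen : (fillRows k (List.replicate k 0) grid).length = grid.length :=
        fillRows_length _ _ _
      have hie := inner_eq k grid grid [] [] (fillRows k (List.replicate k 0) grid) 0
        rfl rfl hlen
      simp only [List.length_nil, Nat.cast_zero, zero_add, List.nil_append] at hie
      rw [hie, step_col k grid (List.replicate k 0) 0 (by simp)
        (fun r hr => by have := hrows r hr; omega), ← List.replicate_succ']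

theorem a_eq_fillRows (grid : List (List Int)) (h : Pre_solve_d037b0a7 grid) :
    solve_d037b0a7 grid
      = fillRows ((PySem.List.pyGet? grid 0).getD []).length
          (List.replicate ((PySem.List.pyGet? grid 0).getD []).length 0) grid := by
  obtain ⟨hne, hrows⟩ := h
  cases grid with
  | nil => exact absurd rfl hne
  | cons a l =>
      have hw : ((PySem.List.pyGet? (a :: l) 0).getD []) = a := by simp [PySem.List.pyGet?, PySem.List.pyIdx?]
      simp only [solve_d037b0a7, hw]
      exact outer_fold a.length (a :: l)
        (fun row hr => by simpa using hrows row hr) a.length le_rfl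

-- the carried value seen forward equals the first nonzero seen scanning backward
theorem carry_reverse (xs : List Int) (d : Int) :
    ((xs.reverse.findSome? (fun x => if x ≠ 0 then some x else none)).getD d)
      = (if xs.foldl carrystep 0 ≠ 0 then xs.foldl carrystep 0 else d) := by
  induction xs using List.reverseRecOn with
  | nil => simp
  | append_singleton xs y ih =>
      rw [List.reverse_append]
      simp only [List.reverse_cons, List.reverse_nil, List.nil_append, List.singleton_append,
        List.findSome?_cons, List.foldl_append, List.foldl_cons, List.foldl_nil]
      by_cases hy : y = 0
      · simpa [hy, carrystep] using ih
      · simp [hy, carrystep]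

-- nearestAbove at natural indices inside the grid computes cellG
-- column prefix as a map over indices
theorem colPre_take (grid : List (List Int)) (c r : Nat) (hr : r < grid.length) :
    (List.range (r + 1)).map (fun j => (grid.getD j []).getD c 0)
      = (grid.take (r + 1)).map (fun g => g.getD c 0) := by
  apply List.ext_getElem
  · simp; omega
  · intro i h1 h2
    simp only [List.getElem_map, List.getElem_range, List.getElem_take]
    congr 1
    rw [List.getD_eq_getElem grid [] (by simp at h1; omega)]

theorem nearestAbove_eq (grid : List (List Int)) (r c : Nat) (hr : r < grid.length) :
    nearestAbove grid (r : Int) (c : Int) = cellG grid r c := by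
  have hval : ∀ l : List Nat,
      l.findSome? (fun j : Nat =>
        let x := PySem.List.pyGetD (PySem.List.pyGetD grid (j : Int) []) (c : Int) 0
        if x ≠ 0 then some x else none)
      = (l.map (fun j => (grid.getD j []).getD c 0)).findSome?
          (fun x => if x ≠ 0 then some x else none) := by
    intro l
    rw [List.findSome?_map]
    congr 1
    funext j
    simp [Function.comp, PySem.List.pyGetD_natCast]
  unfold nearestAbove cellG
  rw [PySem.List.pyRange_neg_one_eq_reverse]
  have h1 : ((r : Int) + 1) = ((r + 1 : Nat) : Int) := by push_cast; ring
  rw [show ((-1 : Int) + 1) = (0 : Int) by norm_num, h1, PySem.List.pyRange_zero_nat,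
    ← List.map_reverse, List.findSome?_map]
  have hcomp : ((fun rr : Int =>
        let x := PySem.List.pyGetD (PySem.List.pyGetD grid rr []) (c : Int) 0
        if x ≠ 0 then some x else none) ∘ (fun k : Nat => (k : Int)))
      = (fun j : Nat =>
        let x := PySem.List.pyGetD (PySem.List.pyGetD grid (j : Int) []) (c : Int) 0
        if x ≠ 0 then some x else none) := rfl
  rw [hcomp, hval, List.map_reverse, colPre_take grid c r hr,
    carry_reverse ((grid.take (r + 1)).map (fun g => g.getD c 0)) _]
  simp [colCarry, PySem.List.pyGetD_natCast]


-- B-side extraction: the inner fold only rewrites row r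
theorem inner_hoist (r : Nat) (f : Int → Int) : ∀ (cs : List Int) (out : List (List Int)),
    r < out.length →
    cs.foldl (fun o c => PySem.List.pySetD o (r : Int)
        (PySem.List.pySetD (PySem.List.pyGetD o (r : Int) []) c (f c))) out
      = PySem.List.pySetD out (r : Int)
          (cs.foldl (fun rw c => PySem.List.pySetD rw c (f c)) (PySem.List.pyGetD out (r : Int) [])) := by
  intro cs
  induction cs with
  | nil =>
      intro out hr
      simp only [List.foldl_nil, PySem.List.pySetD_natCast, PySem.List.pyGetD_natCast]
      rw [List.getD_eq_getElem _ _ hr, List.set_getElem_self]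
  | cons c cs ih =>
      intro out hr
      rw [List.foldl_cons, ih _ (by simpa using hr), List.foldl_cons,
        PySem.List.pyGetD_pySetD_natCast _ _ _ _ _ hr]
      simp [List.set_set]

-- a fold of per-index sets over range W rewrites the first W cells of the row
theorem row_fold (f : Nat → Int) : ∀ (W : Nat) (row : List Int), W ≤ row.length →
    (List.range W).foldl (fun rw c => rw.set c (f c)) row
      = (List.range W).map f ++ row.drop W := by
  intro W
  induction W with
  | zero => intro row _; simp
  | succ W ih =>
      intro row hW
      rw [List.range_succ, List.foldl_append, List.foldl_cons, List.foldl_nil,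
        ih row (by omega)]
      have h1 := set_append_length (List.map f (List.range W)) (row.drop W) (f W)
      simp only [List.length_map, List.length_range] at h1
      rw [h1, List.drop_eq_getElem_cons (by omega : W < row.length), List.set_cons_zero]
      simp

-- B's outer loop, with the processed prefix made explicit
theorem b_outer (grid : List (List Int)) (W : Nat) :
    ∀ (gs gdone done : List (List Int)),
    grid = gdone ++ gs → done.length = gdone.length → (∀ row ∈ gs, W ≤ row.length) →
    ((PySem.List.pyRange (gdone.length : Int) ((gdone.length : Int) + (gs.length : Int)) 1).foldl
      (fun out r => (PySem.List.pyRange 0 (W : Int) 1).foldl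
        (fun out c => PySem.List.pySetD out r
          (PySem.List.pySetD (PySem.List.pyGetD out r []) c (nearestAbove grid r c))) out)
      (done ++ gs))
      = done ++ buildOut grid W gdone.length gs := by
  intro gs
  induction gs with
  | nil =>
      intro gdone done hG hd _
      rw [PySem.List.pyRange_one_eq_nil
        (a := (gdone.length : Int)) (b := (gdone.length : Int) + (([] : List (List Int)).length : Int)) (by simp)]
      simp [buildOut]
  | cons row rest ih =>
      intro gdone done hG hd hrows
      have hWrow : W ≤ row.length := hrows row (by simp)
      have hgl : gdone.length < grid.length := by rw [hG]; simp
      rw [PySem.List.pyRange_one_cons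
        (a := (gdone.length : Int)) (b := (gdone.length : Int) + ((row :: rest).length : Int))
        (by simp only [List.length_cons]; push_cast; omega), List.foldl_cons]
      have hrlen : gdone.length < (done ++ row :: rest).length := by simp; omega
      rw [inner_hoist gdone.length (fun c => nearestAbove grid (gdone.length : Int) c) _ _ hrlen]
      have hstate : PySem.List.pyGetD (done ++ row :: rest) (gdone.length : Int) [] = row := by
        rw [PySem.List.pyGetD_natCast, ← hd, getD_append_length]
      have hbody : (fun (rw : List Int) (c : Nat) =>
            PySem.List.pySetD rw (c : Int) (nearestAbove grid (gdone.length : Int) (c : Int)))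
          = (fun rw c => rw.set c (cellG grid gdone.length c)) := by
        funext rw c
        rw [PySem.List.pySetD_natCast, nearestAbove_eq grid gdone.length c hgl]
      have hrowres : (PySem.List.pyRange 0 (W : Int) 1).foldl
            (fun rw c => PySem.List.pySetD rw c (nearestAbove grid (gdone.length : Int) c)) row
          = (List.range W).map (fun c => cellG grid gdone.length c) ++ row.drop W := by
        rw [PySem.List.pyRange_zero_nat, List.foldl_map, hbody,
          row_fold (cellG grid gdone.length) W row hWrow]
      rw [hstate, hrowres]
      set newrow := (List.range W).map (fun c => cellG grid gdone.length c) ++ row.drop W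
        with hnr
      have hset : PySem.List.pySetD (done ++ row :: rest) (gdone.length : Int) newrow
          = (done ++ [newrow]) ++ rest := by
        rw [PySem.List.pySetD_natCast, ← hd, set_append_length]
        simp
      rw [hset]
      have hb1 : ((gdone.length : Int) + 1) = (((gdone ++ [row]).length : Nat) : Int) := by
        simp
      have hb2 : ((gdone.length : Int) + ((row :: rest).length : Int))
          = (((gdone ++ [row]).length : Nat) : Int) + (rest.length : Int) := by
        simp; ring
      rw [hb1, hb2, ih (gdone ++ [row]) (done ++ [newrow]) (by simp [hG]) (by simp [hd])
        (fun r hr => hrows r (by simp [hr]))]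
      simp [buildOut, hnr]

-- fillRows with a correct carry vector computes buildOut
theorem fill_build (grid : List (List Int)) (W : Nat) :
    ∀ (gs p : List (List Int)) (last : List Int),
    grid = p ++ gs → last.length = W →
    (∀ c, c < W → last.getD c 0 = colCarry p c) →
    (∀ row ∈ gs, W ≤ row.length) →
    fillRows W last gs = buildOut grid W p.length gs := by
  intro gs
  induction gs with
  | nil => intro p last _ _ _ _; simp [fillRows, buildOut]
  | cons row rest ih =>
      intro p last hG hlen hcar hrows
      have hWrow : W ≤ row.length := hrows row (by simp)
      simp only [fillRows, buildOut]
      set last' := (row.zip last).map (fun q => if q.1 ≠ 0 then q.1 else q.2) with hl'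
      have hlen' : last'.length = W := by simp [hl', List.length_zip]; omega
      have htake : grid.take (p.length + 1) = p ++ [row] := by
        rw [hG, List.take_append]
        simp
      have hgetp : grid.getD p.length [] = row := by
        rw [hG, getD_append_length]
      have hcolapp : ∀ i, colCarry (p ++ [row]) i = carrystep (colCarry p i) (row.getD i 0) := by
        intro i
        simp [colCarry, List.map_append]
      have hlast' : ∀ i (hi : i < W), last'.getD i 0
          = carrystep (last.getD i 0) (row.getD i 0) := by
        intro i hi
        rw [List.getD_eq_getElem last' 0 (by omega), List.getD_eq_getElem last 0 (by omega),
          List.getD_eq_getElem row 0 (by omega)]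
        simp only [hl', List.getElem_map, List.getElem_zip]
        simp [carrystep]
      have hcar' : ∀ i, i < W → last'.getD i 0 = colCarry (p ++ [row]) i := by
        intro i hi
        rw [hlast' i hi, hcolapp, hcar i hi]
      congr 1
      · congr 1
        apply List.ext_getElem
        · simp [List.length_zip]; omega
        · intro i h1 h2
          have hiW : i < W := by simpa using h2
          simp only [List.getElem_map, List.getElem_zip, List.getElem_range]
          have e1 : last'[i]'(by omega) = carrystep (colCarry p i) (row.getD i 0) := by
            rw [← List.getD_eq_getElem last' 0 (by omega), hlast' i hiW, hcar i hiW]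
          have e2 : row[i]'(by omega) = row.getD i 0 :=
            (List.getD_eq_getElem row 0 (by omega)).symm
          simp only [e1, e2]
          have hgetp' : (grid[p.length]?.getD [] : List Int) = row := by
            simpa [List.getD] using hgetp
          simp [cellG, htake, hcolapp, hgetp', carrystep]
      · have := ih (p ++ [row]) last' (by simp [hG]) hlen' hcar'
          (fun r hr => hrows r (by simp [hr]))
        simpa using this

theorem b_eq_buildOut (grid : List (List Int)) (h : Pre_solve_d037b0a7 grid) :
    solve_d037b0a7_alt grid
      = buildOut grid ((PySem.List.pyGet? grid 0).getD []).length 0 grid := by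
  obtain ⟨hne, hrows⟩ := h
  unfold solve_d037b0a7_alt
  have hmap : grid.map (fun row => row) = grid := by simp
  rw [hmap]
  have := b_outer grid ((PySem.List.pyGet? grid 0).getD []).length grid [] [] rfl rfl
    (fun row hr => by
      cases grid with
      | nil => exact absurd rfl hne
      | cons a l =>
          have hw : ((PySem.List.pyGet? (a :: l) 0).getD []) = a := by
            simp [PySem.List.pyGet?, PySem.List.pyIdx?]
          rw [hw]
          simpa using hrows row hr)
  simpa using this

-- ===== VERDICT (by name: the statement is the Claim_ definition above) =====
theorem solve_d037b0a7_spec : Claim_equal_solve_d037b0a7 := by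
  intro grid _ hpre
  unfold Spec_solve_d037b0a7
  rw [b_eq_buildOut grid hpre, a_eq_fillRows grid hpre]
  obtain ⟨hne, hrows⟩ := hpre
  have hrows' : ∀ row ∈ grid, ((PySem.List.pyGet? grid 0).getD []).length ≤ row.length := by
    intro row hr
    cases grid with
    | nil => exact absurd rfl hne
    | cons a l =>
        have hw : ((PySem.List.pyGet? (a :: l) 0).getD []) = a := by
          simp [PySem.List.pyGet?, PySem.List.pyIdx?]
        rw [hw]; simpa using hrows row hr
  exact fill_build grid _ grid [] _ rfl (by simp) (by simp [colCarry]) hrows'
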